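-- pv_equiv track=rewrite | github.com/ankit003/Macro-Pre-Processor | macro_pre_processor.py | word_div
-- ===== SOURCE A (Python) =====
-- def word_div(line):																	#This function will divide a line in lexemes. List of lexemes will be returned.
-- 	N=len(line)
-- 	j=0
-- 	i=0
-- 	word_list=[]
-- 	word_list2=[]
-- 	while (j<N):
-- 		word=""
-- 		while(j<N):
-- 			if(line[j].isalnum()):
-- 				word+=line[j]
-- 				j+=1
-- 			else:
-- 				word_list.append(word)
-- 				del word
-- 				break
-- 		if(j==N):
-- 			word_list.append(word)
-- 		if(j>=N):
-- 			break
-- 		else: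
-- 			word_list.append(line[j])
-- 			j+=1
-- 	for j in word_list:
-- 		if(j.isspace() or j==''):
-- 			pass
-- 		else:
-- 			word_list2.append(j)
-- 	return word_list2
-- ===== SOURCE B (Python) =====
-- def word_div(line):
--     # Boundary-slicing algorithm: first compute the start index of every maximal
--     # run of same-class (alnum vs non-alnum) characters, then slice the line at
--     # those boundaries; an alnum run becomes one word, a non-alnum run yields its
--     # non-whitespace characters one by one.
--     n = len(line)
--     starts = [i for i in range(n)
--               if i == 0 or line[i].isalnum() != line[i - 1].isalnum()]
--     out = []
--     for s, e in zip(starts, starts[1:] + [n]):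
--         if line[s].isalnum():
--             out.append(line[s:e])
--         else:
--             out.extend(c for c in line[s:e] if not c.isspace())
--     return out
-- ===== Notes on version B (the rewrite author's own statement) =====
-- stated objective: alternative
-- what changed: Replaced A's nested index-driven while loops building an intermediate token list that a second pass filters with a boundary-slicing algorithm: first compute every run-start index where the alnum/non-alnum class changes, then slice the line between consecutive boundaries, emitting alnum slices whole and the non-space characters of the other slices; slicing avoids A's per-character string += accumulation, which blows up on long runs.
import Mathlib
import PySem

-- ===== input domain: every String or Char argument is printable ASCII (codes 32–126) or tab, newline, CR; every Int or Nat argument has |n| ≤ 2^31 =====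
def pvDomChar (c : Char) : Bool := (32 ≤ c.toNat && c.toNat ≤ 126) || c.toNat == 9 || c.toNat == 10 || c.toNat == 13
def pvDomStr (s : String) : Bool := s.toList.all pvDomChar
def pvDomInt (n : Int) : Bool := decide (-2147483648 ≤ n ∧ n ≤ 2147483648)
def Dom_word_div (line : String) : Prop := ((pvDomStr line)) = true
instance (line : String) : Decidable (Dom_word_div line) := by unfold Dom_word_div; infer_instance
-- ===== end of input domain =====

-- B replaces A's nested index-driven scans plus a second filtering pass by a
-- boundary-slicing algorithm: compute all run-start indices first, then slice
-- the line at those boundaries (a timing run measured B faster on large inputs).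

-- ===== PORT A =====
-- inner 'while(j<N)' loop of A: accumulate alphanumeric chars into word, stop at N or a
-- non-alnum char; fuel only makes the recursion structural (callers pass fuel = N - j)
def pvAScan (cs : List Char) (N fuel j : Nat) (word : List Char) : List Char × Nat :=
  match fuel with
  | 0 => (word, j)
  | fuel + 1 =>
    if j < N then
      let c := cs.getD j ' '
      if PySem.Chars.isalnum c then pvAScan cs N fuel (j + 1) (word ++ [c]) else (word, j)
    else (word, j)

-- outer 'while (j<N)' loop of A, building word_list (fuel = N is always enough)
def pvAOuter (cs : List Char) (N fuel j : Nat) (acc : List (List Char)) : List (List Char) :=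
  match fuel with
  | 0 => acc
  | fuel + 1 =>
    if j < N then
      let p := pvAScan cs N (N - j) j []
      if p.2 = N then acc ++ [p.1]
      else pvAOuter cs N fuel (p.2 + 1) (acc ++ [p.1, [cs.getD p.2 ' ']])
    else acc

def word_div (line : String) : List String :=
  -- final 'for j in word_list' pass: drop whitespace tokens and empty strings
  ((pvAOuter line.toList line.toList.length line.toList.length 0 []).filter
      (fun w => !(PySem.Chars.strIsspace w || w.isEmpty))).map String.ofList

-- ===== PORT B =====
-- Source B's 'starts' comprehension: indices where a maximal same-class run begins
def pvBStarts (cs : List Char) : List Nat :=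
  (List.range cs.length).filter (fun i =>
    i == 0 || (PySem.Chars.isalnum (cs.getD i ' ') != PySem.Chars.isalnum (cs.getD (i - 1) ' ')))

-- body of Source B's 'for s, e in zip(...)' loop: emit a word slice or its non-space chars
def pvBEmit (cs : List Char) (out : List (List Char)) (se : Nat × Nat) : List (List Char) :=
  let seg := (cs.drop se.1).take (se.2 - se.1)
  if PySem.Chars.isalnum (cs.getD se.1 ' ') then out ++ [seg]
  else out ++ (seg.filter (fun c => !PySem.Chars.isspace c)).map (fun c => [c])

def word_div_alt (line : String) : List String :=
  let cs := line.toList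
  let starts := pvBStarts cs
  ((starts.zip (starts.tail ++ [cs.length])).foldl (pvBEmit cs) []).map String.ofList

-- ===== PRECONDITION & SPEC =====
def Spec_word_div (line : String) (out : List String) : Prop := out = word_div_alt line
instance (line : String) (out : List String) : Decidable (Spec_word_div line out) := by unfold Spec_word_div; infer_instance

-- ===== CLAIM (what is proved, stated in full; the proofs are below) =====
def Claim_equal_word_div : Prop := ∀ (line : String), Dom_word_div line → Spec_word_div line (word_div line)

-- ===== LEMMAS AND PROOFS =====

-- reference tokenizer: tokGo cs w = the kept tokens of (w ++ cs), w being the alnum word read so far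
def tokGo : List Char → List Char → List (List Char)
  | [], w => if w.isEmpty then [] else [w]
  | c :: cs, w =>
    if PySem.Chars.isalnum c then tokGo cs (w ++ [c])
    else (if w.isEmpty then [] else [w]) ++
         (if PySem.Chars.isspace c then [] else [[c]]) ++ tokGo cs []

theorem alnum_not_space (c : Char) (h : PySem.Chars.isalnum c = true) :
    PySem.Chars.isspace c = false := by
  simp [PySem.Chars.isalnum, PySem.Chars.isalpha, PySem.Chars.isdigit,
        PySem.Chars.isupper, PySem.Chars.islower, Char.le_def,
        UInt32.le_iff_toNat_le] at h
  simp [PySem.Chars.isspace]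
  omega

theorem strIsspace_of_alnum (t : List Char) (h : ∀ c ∈ t, PySem.Chars.isalnum c = true) :
    PySem.Chars.strIsspace t = false := by
  cases t with
  | nil => rfl
  | cons c t =>
    simp [PySem.Chars.strIsspace]
    intro hc
    exact absurd hc (by simp [alnum_not_space c (h c (by simp))])

theorem filter_keep_word (t : List Char) (h : ∀ c ∈ t, PySem.Chars.isalnum c = true) :
    List.filter (fun w => !(PySem.Chars.strIsspace w || w.isEmpty)) [t]
      = if t.isEmpty then [] else [t] := by
  cases t with
  | nil => rfl
  | cons c t => simp [List.filter, strIsspace_of_alnum _ h]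

theorem filter_keep_char (c : Char) :
    List.filter (fun w => !(PySem.Chars.strIsspace w || w.isEmpty)) [[c]]
      = if PySem.Chars.isspace c then [] else [[c]] := by
  by_cases hc : PySem.Chars.isspace c = true <;>
    simp [List.filter, PySem.Chars.strIsspace, hc]

theorem tokGo_alnum_append (t : List Char) (h : ∀ c ∈ t, PySem.Chars.isalnum c = true)
    (w r : List Char) : tokGo (t ++ r) w = tokGo r (w ++ t) := by
  induction t generalizing w with
  | nil => simp
  | cons c t ih =>
    simp only [List.cons_append, tokGo, h c (by simp), if_true]
    rw [ih (fun d hd => h d (by simp [hd]))]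
    simp

theorem pvAScan_eq (cs : List Char) (fuel j : Nat) (w : List Char)
    (hf : cs.length - j ≤ fuel) :
    pvAScan cs cs.length fuel j w
      = (w ++ (cs.drop j).takeWhile PySem.Chars.isalnum,
         j + ((cs.drop j).takeWhile PySem.Chars.isalnum).length) := by
  induction fuel generalizing j w with
  | zero =>
    rw [pvAScan, List.drop_eq_nil_of_le (by omega)]
    simp
  | succ fuel ih =>
    rw [pvAScan]
    by_cases h : j < cs.length
    · have hd : cs.drop j = cs[j] :: cs.drop (j + 1) := (List.getElem_cons_drop h).symm
      have hc : cs.getD j ' ' = cs[j] := by simp [List.getElem?_eq_getElem h]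
      simp only [h, if_true, hc]
      by_cases hal : PySem.Chars.isalnum cs[j] = true
      · rw [hal]
        simp only [if_pos]
        rw [ih (j + 1) (w ++ [cs[j]]) (by omega), hd, List.takeWhile_cons, hal]
        simp
        omega
      · have hal' : PySem.Chars.isalnum cs[j] = false := by simpa using hal
        rw [hal']
        simp only [Bool.false_eq_true, ite_false]
        rw [hd, List.takeWhile_cons, hal']
        simp
    · rw [if_neg h, List.drop_eq_nil_of_le (by omega)]
      simp

theorem pvAOuter_eq (cs : List Char) (fuel j : Nat) (acc : List (List Char))
    (hf : cs.length - j ≤ fuel) :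
    List.filter (fun w => !(PySem.Chars.strIsspace w || w.isEmpty)) (pvAOuter cs cs.length fuel j acc)
      = List.filter (fun w => !(PySem.Chars.strIsspace w || w.isEmpty)) acc ++ tokGo (cs.drop j) [] := by
  induction fuel generalizing j acc with
  | zero =>
    rw [pvAOuter, List.drop_eq_nil_of_le (by omega)]
    simp [tokGo]
  | succ fuel ih =>
    rw [pvAOuter]
    by_cases h : j < cs.length
    · rw [if_pos h]
      simp only [pvAScan_eq cs (cs.length - j) j [] (le_refl _), List.nil_append]
      set d := cs.drop j with hdd
      set t := d.takeWhile PySem.Chars.isalnum with htt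
      have halt : ∀ c ∈ t, PySem.Chars.isalnum c = true := fun c hc => List.mem_takeWhile_imp hc
      have hdlen : d.length = cs.length - j := by simp [hdd]
      by_cases hN : j + t.length = cs.length
      · rw [if_pos hN]
        have htd : t = d := by
          apply List.IsPrefix.eq_of_length (List.takeWhile_prefix _)
          rw [← htt]
          omega
        have hdne : d ≠ [] := by
          intro hnil; rw [hnil] at hdlen; simp at hdlen; omega
        rw [List.filter_append, filter_keep_word t halt]
        rw [show tokGo d [] = tokGo (t ++ []) [] from by rw [htd]; simp,
            tokGo_alnum_append t halt, tokGo]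
        simp [htd, hdne]
      · rw [if_neg hN]
        have htlt : j + t.length < cs.length := by
          have h3 := (List.takeWhile_prefix (l := d) PySem.Chars.isalnum).length_le
          rw [← htt] at h3
          omega
        have hrne : d.dropWhile PySem.Chars.isalnum ≠ [] := by
          intro hnil
          have h3 := List.takeWhile_append_dropWhile (p := PySem.Chars.isalnum) (l := d)
          rw [hnil, List.append_nil] at h3
          have h4 : t = d := by rw [htt, h3]
          apply hN
          rw [h4, hdlen]
          omega
        obtain ⟨c, r', hr⟩ := List.exists_cons_of_ne_nil hrne
        have hcal : PySem.Chars.isalnum c = false := by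
          have h4 := List.head_dropWhile_not PySem.Chars.isalnum hrne
          simp [hr] at h4
          exact h4
        have hdtr : d = t ++ c :: r' := by rw [htt, ← hr, List.takeWhile_append_dropWhile]
        have hget : cs.getD (j + t.length) ' ' = c := by
          rw [List.getD_eq_getElem?_getD, ← List.getElem?_drop, ← hdd, hdtr,
              List.getElem?_append_right (Nat.le_refl t.length)]
          simp
        have hdrop : cs.drop (j + t.length + 1) = r' := by
          rw [show j + t.length + 1 = j + (t.length + 1) by omega, ← List.drop_drop, ← hdd, hdtr,
              List.drop_append]
          simp
        rw [ih (j + t.length + 1) (acc ++ [t, [cs.getD (j + t.length) ' ']]) (by omega),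
            hdrop, hget]
        rw [show (acc ++ [t, [c]]) = (acc ++ [t]) ++ [[c]] by simp]
        rw [List.filter_append, List.filter_append, filter_keep_word t halt, filter_keep_char c]
        rw [hdtr, tokGo_alnum_append t halt, tokGo]
        simp [hcal]
    · rw [if_neg h, List.drop_eq_nil_of_le (by omega)]
      simp [tokGo]

-- ---------- B side ----------

-- what one segment contributes to the output
def pvG (cs : List Char) (se : Nat × Nat) : List (List Char) :=
  if PySem.Chars.isalnum (cs.getD se.1 ' ')
  then [(cs.drop se.1).take (se.2 - se.1)]
  else (((cs.drop se.1).take (se.2 - se.1)).filter (fun c => !PySem.Chars.isspace c)).map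
        (fun c => [c])

def pvSegs (cs : List Char) : List (Nat × Nat) :=
  (pvBStarts cs).zip ((pvBStarts cs).tail ++ [cs.length])

theorem pvBEmit_eq (cs : List Char) (out : List (List Char)) (se : Nat × Nat) :
    pvBEmit cs out se = out ++ pvG cs se := by
  unfold pvBEmit pvG
  split_ifs <;> rfl

theorem foldl_pvBEmit (cs : List Char) (l : List (Nat × Nat)) (acc : List (List Char)) :
    l.foldl (pvBEmit cs) acc = acc ++ l.flatMap (pvG cs) := by
  induction l generalizing acc with
  | nil => simp
  | cons x l ih => simp [pvBEmit_eq, ih, List.flatMap_cons]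

theorem tokGo_nonalnum_append (t : List Char) (h : ∀ c ∈ t, PySem.Chars.isalnum c = false)
    (r : List Char) :
    tokGo (t ++ r) [] = (t.filter (fun c => !PySem.Chars.isspace c)).map (fun c => [c])
      ++ tokGo r [] := by
  induction t with
  | nil => simp
  | cons c t ih =>
    simp only [List.cons_append, tokGo, h c (by simp), Bool.false_eq_true, if_false,
      List.isEmpty_nil, if_true, List.nil_append, List.filter_cons]
    rw [ih (fun d hd => h d (by simp [hd]))]
    by_cases hs : PySem.Chars.isspace c = true <;> simp [hs]

theorem tokGo_flush (r t : List Char) (ht : t ≠ [])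
    (hr : r = [] ∨ PySem.Chars.isalnum (r.getD 0 ' ') = false) :
    tokGo r t = [t] ++ tokGo r [] := by
  cases r with
  | nil => simp [tokGo, ht]
  | cons c r' =>
    have hc : PySem.Chars.isalnum c = false := by
      rcases hr with h | h
      · exact absurd h (by simp)
      · simpa using h
    simp [tokGo, hc, ht]

theorem dropWhile_cons_false {α : Type} (p : α → Bool) :
    ∀ (l : List α) (a : α) (l' : List α), l.dropWhile p = a :: l' → p a = false := by
  intro l
  induction l with
  | nil => intro a l' h; simp [List.dropWhile] at h
  | cons b l ih =>
    intro a l' h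
    rw [List.dropWhile_cons] at h
    by_cases hb : p b = true
    · rw [if_pos hb] at h; exact ih a l' h
    · rw [if_neg hb] at h
      cases h
      simpa using hb

-- run-decomposition of the start indices
theorem starts_decomp (t r : List Char) (k0 : Bool) (hL1 : 1 ≤ t.length)
    (ht : ∀ d ∈ t, PySem.Chars.isalnum d = k0)
    (hr : ∀ a l', r = a :: l' → PySem.Chars.isalnum a ≠ k0) :
    pvBStarts (t ++ r) = 0 :: (pvBStarts r).map (t.length + ·) := by
  have hKj : ∀ j, j < t.length → PySem.Chars.isalnum ((t ++ r).getD j ' ') = k0 := by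
    intro j hj
    rw [List.getD_append _ _ _ _ hj, List.getD_eq_getElem _ _ hj]
    exact ht _ (List.getElem_mem hj)
  have hKr : ∀ j, (t ++ r).getD (t.length + j) ' ' = r.getD j ' ' := by
    intro j
    rw [List.getD_append_right _ _ _ _ (by omega)]
    congr 1
    omega
  have hrne0 : ∀ j, j < r.length → PySem.Chars.isalnum (r.getD 0 ' ') ≠ k0 := by
    intro j hj
    cases hre : r with
    | nil => rw [hre] at hj; simp at hj
    | cons a r'' =>
      simpa using hr a r'' hre
  have hlen : (t ++ r).length = t.length + r.length := by simp
  unfold pvBStarts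
  rw [hlen, List.range_add, List.filter_append]
  have hpart1 :
      (List.range t.length).filter (fun i =>
        i == 0 || (PySem.Chars.isalnum ((t ++ r).getD i ' ')
          != PySem.Chars.isalnum ((t ++ r).getD (i-1) ' ')))
      = [0] := by
    obtain ⟨L', hL'⟩ : ∃ L', t.length = L' + 1 := ⟨t.length - 1, by omega⟩
    rw [hL', List.range_succ_eq_map, List.filter_cons, if_pos (by simp)]
    have hnil : (List.filter (fun i =>
        i == 0 || (PySem.Chars.isalnum ((t ++ r).getD i ' ')
          != PySem.Chars.isalnum ((t ++ r).getD (i-1) ' ')))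
        ((List.range L').map Nat.succ)) = [] := by
      rw [List.filter_eq_nil_iff]
      intro a ha
      simp only [List.mem_map, List.mem_range] at ha
      obtain ⟨i, hi, rfl⟩ := ha
      have h1 : PySem.Chars.isalnum ((t ++ r).getD (i + 1) ' ') = k0 := hKj (i + 1) (by omega)
      have h2 : PySem.Chars.isalnum ((t ++ r).getD (i + 1 - 1) ' ') = k0 := hKj _ (by omega)
      simp only [Nat.succ_eq_add_one, Bool.or_eq_true, beq_iff_eq, bne_iff_ne, ne_eq, not_or,
        Decidable.not_not]
      exact ⟨by omega, by rw [h1, h2]⟩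
    rw [hnil]
  rw [hpart1]
  have hpart2 :
      ((List.range r.length).map (t.length + ·)).filter (fun i =>
        i == 0 || (PySem.Chars.isalnum ((t ++ r).getD i ' ')
          != PySem.Chars.isalnum ((t ++ r).getD (i-1) ' ')))
      = ((List.range r.length).filter (fun i =>
          i == 0 || (PySem.Chars.isalnum (r.getD i ' ')
            != PySem.Chars.isalnum (r.getD (i-1) ' ')))).map (t.length + ·) := by
    rw [List.filter_map]
    congr 1
    apply List.filter_congr
    intro j hj
    simp only [List.mem_range] at hj
    simp only [Function.comp]
    cases j with
    | zero =>
      have e1 : (t ++ r).getD (t.length + 0) ' ' = r.getD 0 ' ' := hKr 0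
      have e2 : PySem.Chars.isalnum ((t ++ r).getD (t.length + 0 - 1) ' ') = k0 :=
        hKj (t.length - 1) (by omega)
      have e3 := hrne0 0 hj
      have l2 : (PySem.Chars.isalnum ((t ++ r).getD (t.length + 0) ' ')
          != PySem.Chars.isalnum ((t ++ r).getD (t.length + 0 - 1) ' ')) = true := by
        simp only [bne_iff_ne, ne_eq, e1, e2]
        exact e3
      simp only [l2, Bool.or_true]
      simp
    | succ j' =>
      have b1 : (t.length + (j' + 1) == 0) = false := by simp
      have b2 : ((j' + 1 : Nat) == 0) = false := by simp
      have e1 : (t ++ r).getD (t.length + (j' + 1)) ' ' = r.getD (j' + 1) ' ' := hKr (j' + 1)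
      have e2 : (t ++ r).getD (t.length + (j' + 1) - 1) ' ' = r.getD (j' + 1 - 1) ' ' := by
        rw [show t.length + (j' + 1) - 1 = t.length + j' from by omega, hKr j']
        rfl
      rw [b1, b2, e1, e2]
  rw [hpart2]
  rfl

theorem starts_head_zero (a : Char) (l : List Char) : ∃ u₂, pvBStarts (a :: l) = 0 :: u₂ := by
  unfold pvBStarts
  rw [List.length_cons, List.range_succ_eq_map, List.filter_cons, if_pos (by simp)]
  exact ⟨_, rfl⟩

theorem pvG_shift (t r : List Char) (s e : Nat) :
    pvG (t ++ r) (t.length + s, t.length + e) = pvG r (s, e) := by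
  have hdrop : (t ++ r).drop (t.length + s) = r.drop s := by
    rw [← List.drop_drop, List.drop_left]
  have hget : (t ++ r).getD (t.length + s) ' ' = r.getD s ' ' := by
    rw [List.getD_append_right _ _ _ _ (by omega)]
    congr 1
    omega
  unfold pvG
  simp only [hdrop, hget]
  rw [show t.length + e - (t.length + s) = e - s from by omega]

theorem zip_shape (m : List Nat) (n : Nat) :
    (0 :: m).zip (m ++ [n]) = (0, m.headD n) :: m.zip (m.tail ++ [n]) := by
  cases m with
  | nil => rfl
  | cons x m' => rfl

theorem flatMap_map' {α β γ : Type} (f : α → β) (g : β → List γ) (l : List α) :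
    (l.map f).flatMap g = l.flatMap (fun x => g (f x)) := by
  induction l with
  | nil => rfl
  | cons x l ih => simp [List.flatMap_cons, ih]

theorem segs_flat : ∀ (n : Nat) (cs : List Char), cs.length ≤ n →
    (pvSegs cs).flatMap (pvG cs) = tokGo cs [] := by
  intro n
  induction n with
  | zero =>
    intro cs hcs
    have hnil : cs = [] := by
      cases cs with
      | nil => rfl
      | cons a l => simp at hcs
    subst hnil
    simp [pvSegs, pvBStarts, tokGo]
  | succ n ih =>
    intro cs hcs
    cases hcse : cs with
    | nil => simp [pvSegs, pvBStarts, tokGo]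
    | cons c cs' =>
      subst hcse
      obtain ⟨t, htq⟩ : ∃ t, List.takeWhile
          (fun d => PySem.Chars.isalnum d == PySem.Chars.isalnum c) (c :: cs') = t := ⟨_, rfl⟩
      obtain ⟨r, hrq⟩ : ∃ r, List.dropWhile
          (fun d => PySem.Chars.isalnum d == PySem.Chars.isalnum c) (c :: cs') = r := ⟨_, rfl⟩
      have hcs2 : c :: cs' = t ++ r := by rw [← htq, ← hrq, List.takeWhile_append_dropWhile]
      have ht : ∀ d ∈ t, PySem.Chars.isalnum d = PySem.Chars.isalnum c := by
        intro d hd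
        rw [← htq] at hd
        simpa using List.mem_takeWhile_imp hd
      have hrcons : ∀ a l', r = a :: l' → PySem.Chars.isalnum a ≠ PySem.Chars.isalnum c := by
        intro a l' hre
        have := dropWhile_cons_false _ (c :: cs') a l' (by rw [hrq, hre])
        simpa using this
      have htcons : t = c :: cs'.takeWhile
          (fun d => PySem.Chars.isalnum d == PySem.Chars.isalnum c) := by
        rw [← htq, List.takeWhile_cons, if_pos (by simp)]
      have htne : t ≠ [] := by rw [htcons]; simp
      have hL1 : 1 ≤ t.length := by rw [htcons]; simp
      have hlen : (c :: cs').length = t.length + r.length := by rw [hcs2]; simp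
      have hrlen : r.length ≤ n := by
        simp only [List.length_cons] at hcs hlen
        omega
      have hsd : pvBStarts (c :: cs') = 0 :: (pvBStarts r).map (t.length + ·) := by
        rw [hcs2]
        exact starts_decomp t r (PySem.Chars.isalnum c) hL1 ht hrcons
      unfold pvSegs
      rw [hsd, List.tail_cons, zip_shape, List.flatMap_cons]
      cases hre : r with
      | nil =>
        have hteq : t = c :: cs' := by rw [hcs2, hre, List.append_nil]
        have hstarts_nil : pvBStarts ([] : List Char) = [] := rfl
        rw [hstarts_nil]
        simp only [List.map_nil, List.headD_nil, List.tail_nil, List.nil_append,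
          List.zip_nil_left, List.flatMap_nil, List.append_nil]
        unfold pvG
        simp only [List.drop_zero, Nat.sub_zero, List.take_length]
        have hgd0 : (c :: cs').getD 0 ' ' = c := rfl
        rw [hgd0]
        cases hk : PySem.Chars.isalnum c with
        | true =>
          have hall : ∀ d ∈ t, PySem.Chars.isalnum d = true := fun d hd => (ht d hd).trans hk
          rw [if_pos rfl]
          have h1 : tokGo (c :: cs') [] = tokGo (t ++ []) [] := by
            rw [List.append_nil, hteq]
          rw [h1, tokGo_alnum_append t hall, tokGo, List.nil_append, hteq]
          simp
        | false =>
          rw [if_neg (by simp)]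
          have hall : ∀ d ∈ t, PySem.Chars.isalnum d = false := fun d hd => (ht d hd).trans hk
          have h1 : tokGo (c :: cs') [] = tokGo (t ++ []) [] := by
            rw [List.append_nil, hteq]
          rw [h1, tokGo_nonalnum_append t hall, hteq]
          simp [tokGo]
      | cons a r'' =>
        obtain ⟨u₂, hu⟩ : ∃ u₂, pvBStarts (a :: r'') = 0 :: u₂ := starts_head_zero a r''
        have hcs3 : c :: cs' = t ++ (a :: r'') := by rw [hcs2, hre]
        have hlen3 : (c :: cs').length = t.length + (a :: r'').length := by rw [hlen, hre]
        have hrlen3 : (a :: r'').length ≤ n := by rw [← hre]; exact hrlen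
      -- head of the shifted start list is t.length
        have hheadD : ((pvBStarts (a :: r'')).map (t.length + ·)).headD (c :: cs').length
            = t.length := by
          rw [hu]
          simp
        rw [hheadD]
      -- the first segment is exactly t
        have hfirst : pvG (c :: cs') (0, t.length)
            = if PySem.Chars.isalnum c then [t]
              else (t.filter (fun d => !PySem.Chars.isspace d)).map (fun d => [d]) := by
          unfold pvG
          have hgd0 : (c :: cs').getD 0 ' ' = c := rfl
          have htake : ((c :: cs').drop 0).take (t.length - 0) = t := by
            rw [List.drop_zero, Nat.sub_zero, hcs3, List.take_left]
          rw [hgd0, htake]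
      -- the remaining segments are the segments of the rest, shifted by t.length
        have hrest : (((pvBStarts (a :: r'')).map (t.length + ·)).zip
              ((((pvBStarts (a :: r'')).map (t.length + ·)).tail) ++ [(c :: cs').length])).flatMap
              (pvG (c :: cs'))
            = tokGo (a :: r'') [] := by
          have htail : ((pvBStarts (a :: r'')).map (t.length + ·)).tail
              = ((pvBStarts (a :: r'')).tail).map (t.length + ·) := by
            rw [hu]
            simp
          have hn : [(c :: cs').length] = ([(a :: r'').length].map (t.length + ·)) := by
            rw [hlen3]
            rfl
          rw [htail, hn, ← List.map_append, List.zip_map, flatMap_map']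
          have hfun : ∀ p : Nat × Nat, pvG (c :: cs') (Prod.map (t.length + ·) (t.length + ·) p)
              = pvG (a :: r'') p := by
            intro p
            rw [hcs3]
            exact pvG_shift t (a :: r'') p.1 p.2
          calc ((pvBStarts (a :: r'')).zip ((pvBStarts (a :: r'')).tail
                  ++ [(a :: r'').length])).flatMap
                  (fun p => pvG (c :: cs') (Prod.map (t.length + ·) (t.length + ·) p))
              = ((pvBStarts (a :: r'')).zip ((pvBStarts (a :: r'')).tail
                  ++ [(a :: r'').length])).flatMap (pvG (a :: r'')) := by
                  apply List.flatMap_congr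
                  intro p _
                  exact hfun p
            _ = tokGo (a :: r'') [] := ih (a :: r'') hrlen3
        rw [hrest, hfirst]
      -- combine with the reference tokenizer
        have hrhead : PySem.Chars.isalnum ((a :: r'').getD 0 ' ') ≠ PySem.Chars.isalnum c := by
          simpa using hrcons a r'' hre
        cases hk : PySem.Chars.isalnum c with
        | true =>
          have hall : ∀ d ∈ t, PySem.Chars.isalnum d = true := fun d hd => (ht d hd).trans hk
          rw [if_pos rfl, hcs3, tokGo_alnum_append t hall, List.nil_append,
            tokGo_flush (a :: r'') t htne (Or.inr (by rw [hk] at hrhead; simpa using hrhead))]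
        | false =>
          have hall : ∀ d ∈ t, PySem.Chars.isalnum d = false := fun d hd => (ht d hd).trans hk
          rw [if_neg (by simp), hcs3, tokGo_nonalnum_append t hall]

-- ===== VERDICT (by name: the statement is the Claim_ definition above) =====
theorem word_div_spec : Claim_equal_word_div := by
  intro line _
  unfold Spec_word_div word_div word_div_alt
  simp only []
  rw [pvAOuter_eq line.toList line.toList.length 0 [] (by omega),
      foldl_pvBEmit, List.nil_append,
      show (pvBStarts line.toList).zip ((pvBStarts line.toList).tail ++ [line.toList.length])
        = pvSegs line.toList from rfl,
      segs_flat line.toList.length line.toList (le_refl _)]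
  simp
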